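-- pv_equiv track=rewrite | github.com/Karthika7204/CricAI | src/training_assistant/field_strategy.py | predict_field_setup
-- ===== SOURCE A (Python) =====
-- def predict_field_setup(weaknesses):
--
--     field_positions = []
--
--     for w in weaknesses:
--
--         w = w.lower()
--
--         if "caught" in w or "aerial" in w:
--             field_positions = [
--                 "Slip",
--                 "Gully",
--                 "Point",
--                 "Deep Cover",
--                 "Long Off"
--             ]
--
--         elif "short ball" in w:
--             field_positions = [
--                 "Deep Square Leg",
--                 "Fine Leg",
--                 "Long Leg",
--                 "Mid Wicket"
--             ]
--
--         elif "lbw" in w: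
--             field_positions = [
--                 "Short Mid Wicket",
--                 "Mid On",
--                 "Square Leg",
--                 "Fine Leg"
--             ]
--
--         elif "dot ball" in w:
--             field_positions = [
--                 "Point",
--                 "Cover",
--                 "Mid Off",
--                 "Mid On"
--             ]
--
--     if not field_positions:
--         field_positions = [
--             "Slip",
--             "Point",
--             "Cover",
--             "Mid Off",
--             "Mid On"
--         ]
--
--     return field_positions
-- ===== SOURCE B (Python) =====
-- DEFAULT_FIELD = ["Slip", "Point", "Cover", "Mid Off", "Mid On"]
--
--
-- def _field_for(w):
--     # w is already lower-cased; same branch priority as the original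
--     if "caught" in w or "aerial" in w:
--         return ["Slip", "Gully", "Point", "Deep Cover", "Long Off"]
--     if "short ball" in w:
--         return ["Deep Square Leg", "Fine Leg", "Long Leg", "Mid Wicket"]
--     if "lbw" in w:
--         return ["Short Mid Wicket", "Mid On", "Square Leg", "Fine Leg"]
--     if "dot ball" in w:
--         return ["Point", "Cover", "Mid Off", "Mid On"]
--     return None
--
--
-- def predict_field_setup(weaknesses):
--     # last forward match = first reverse match: scan backwards, return immediately
--     for w in reversed(weaknesses):
--         f = _field_for(w.lower())
--         if f is not None:
--             return f
--     return list(DEFAULT_FIELD)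
-- ===== Notes on version B (the rewrite author's own statement) =====
-- stated objective: simpler
-- what changed: Replaces the forward loop that keeps overwriting an accumulator with a backward scan that returns the field set at the first (i.e. last forward) matching weakness, with no accumulator and early exit.
import Mathlib
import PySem

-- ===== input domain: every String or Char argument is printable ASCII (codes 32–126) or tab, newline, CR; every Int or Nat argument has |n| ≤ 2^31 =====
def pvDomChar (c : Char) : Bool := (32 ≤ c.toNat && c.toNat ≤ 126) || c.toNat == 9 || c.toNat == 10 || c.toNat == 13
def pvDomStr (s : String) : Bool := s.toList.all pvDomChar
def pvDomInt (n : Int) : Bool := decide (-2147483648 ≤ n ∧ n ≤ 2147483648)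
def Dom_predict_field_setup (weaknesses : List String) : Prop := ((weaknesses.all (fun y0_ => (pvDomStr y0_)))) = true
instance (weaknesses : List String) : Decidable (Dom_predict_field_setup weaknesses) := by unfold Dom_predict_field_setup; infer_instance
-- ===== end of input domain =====

-- B replaces A's accumulator-overwriting forward loop by a backward scan returning at the first match (simpler decomposition, same values).

-- ===== PORT A =====
def predict_field_setup (weaknesses : List String) : List String :=
  let field_positions :=
    weaknesses.foldl (fun field_positions w =>
      let w := PySem.Str.lower w
      if PySem.Str.isIn "caught" w || PySem.Str.isIn "aerial" w then
        ["Slip", "Gully", "Point", "Deep Cover", "Long Off"]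
      else if PySem.Str.isIn "short ball" w then
        ["Deep Square Leg", "Fine Leg", "Long Leg", "Mid Wicket"]
      else if PySem.Str.isIn "lbw" w then
        ["Short Mid Wicket", "Mid On", "Square Leg", "Fine Leg"]
      else if PySem.Str.isIn "dot ball" w then
        ["Point", "Cover", "Mid Off", "Mid On"]
      else field_positions) []
  if field_positions = [] then ["Slip", "Point", "Cover", "Mid Off", "Mid On"]
  else field_positions

-- ===== PORT B =====
def pvDefaultField : List String := ["Slip", "Point", "Cover", "Mid Off", "Mid On"]

def pvFieldFor (w : String) : Option (List String) :=
  if PySem.Str.isIn "caught" w || PySem.Str.isIn "aerial" w then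
    some ["Slip", "Gully", "Point", "Deep Cover", "Long Off"]
  else if PySem.Str.isIn "short ball" w then
    some ["Deep Square Leg", "Fine Leg", "Long Leg", "Mid Wicket"]
  else if PySem.Str.isIn "lbw" w then
    some ["Short Mid Wicket", "Mid On", "Square Leg", "Fine Leg"]
  else if PySem.Str.isIn "dot ball" w then
    some ["Point", "Cover", "Mid Off", "Mid On"]
  else none

-- the `for w in reversed(weaknesses): … return f` loop, as recursion over the reversed list
def pvScanBack : List String → List String
  | [] => pvDefaultField
  | w :: rest =>
    match pvFieldFor (PySem.Str.lower w) with
    | some f => f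
    | none => pvScanBack rest

def predict_field_setup_alt (weaknesses : List String) : List String :=
  pvScanBack weaknesses.reverse

-- ===== PRECONDITION & SPEC =====
def Spec_predict_field_setup (weaknesses : List String) (out : List String) : Prop := out = predict_field_setup_alt weaknesses
instance (weaknesses : List String) (out : List String) : Decidable (Spec_predict_field_setup weaknesses out) := by unfold Spec_predict_field_setup; infer_instance

-- ===== CLAIM (what is proved, stated in full; the proofs are below) =====
def Claim_equal_predict_field_setup : Prop := ∀ (weaknesses : List String), Dom_predict_field_setup weaknesses → Spec_predict_field_setup weaknesses (predict_field_setup weaknesses)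

-- ===== LEMMAS AND PROOFS =====

-- A's loop body, named for the proofs (definitionally equal to the inline lambda in the port)
def pvStep (field_positions : List String) (w : String) : List String :=
  let w := PySem.Str.lower w
  if PySem.Str.isIn "caught" w || PySem.Str.isIn "aerial" w then
    ["Slip", "Gully", "Point", "Deep Cover", "Long Off"]
  else if PySem.Str.isIn "short ball" w then
    ["Deep Square Leg", "Fine Leg", "Long Leg", "Mid Wicket"]
  else if PySem.Str.isIn "lbw" w then
    ["Short Mid Wicket", "Mid On", "Square Leg", "Fine Leg"]
  else if PySem.Str.isIn "dot ball" w then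
    ["Point", "Cover", "Mid Off", "Mid On"]
  else field_positions

def pvG (w : String) : Option (List String) := pvFieldFor (PySem.Str.lower w)

lemma pvStep_eq (acc : List String) (w : String) :
    pvStep acc w = match pvG w with | some f => f | none => acc := by
  simp only [pvStep, pvG, pvFieldFor]
  split_ifs <;> rfl

lemma pvFoldl_eq (ws : List String) : ∀ acc : List String,
    ws.foldl pvStep acc =
      match ws.reverse.findSome? pvG with | some f => f | none => acc := by
  induction ws with
  | nil => intro acc; rfl
  | cons w t ih =>
    intro acc
    simp only [List.foldl_cons, List.reverse_cons, List.findSome?_append, ih, pvStep_eq]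
    cases t.reverse.findSome? pvG with
    | some f => rfl
    | none => cases hg : pvG w <;> simp [List.findSome?, hg]
  
lemma pvScanBack_eq (xs : List String) :
    pvScanBack xs = match xs.findSome? pvG with | some f => f | none => pvDefaultField := by
  induction xs with
  | nil => rfl
  | cons w t ih =>
    simp only [pvScanBack, List.findSome?, pvG]
    cases pvFieldFor (PySem.Str.lower w) <;> simp [ih]

lemma pvFieldFor_ne_nil (w : String) (f : List String) (h : pvFieldFor w = some f) : f ≠ [] := by
  unfold pvFieldFor at h
  split_ifs at h <;> injection h with h <;> subst h <;> simp

-- ===== VERDICT (by name: the statement is the Claim_ definition above) =====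
theorem predict_field_setup_spec : Claim_equal_predict_field_setup := by
  intro ws _
  show predict_field_setup ws = predict_field_setup_alt ws
  have hA : predict_field_setup ws =
      (if ws.foldl pvStep [] = [] then ["Slip", "Point", "Cover", "Mid Off", "Mid On"]
       else ws.foldl pvStep []) := rfl
  rw [hA, pvFoldl_eq]
  show _ = pvScanBack ws.reverse
  rw [pvScanBack_eq]
  cases h : ws.reverse.findSome? pvG with
  | none => simp [pvDefaultField]
  | some f =>
    obtain ⟨w, -, hw⟩ := List.exists_of_findSome?_eq_some h
    have := pvFieldFor_ne_nil _ _ hw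
    simp [this]
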